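-- pv_equiv track=rewrite | github.com/UsmanGhias/Interview_Preparation | Arrays/max_product_array.py | max_product_array
-- ===== SOURCE A (Python) =====
-- def max_product_array(arr):
--     if len(arr) < 2:
--         return None
--
--     max_product = arr[0] * arr[1]
--     for i in range(len(arr)):
--         for j in range(i + 1, len(arr)):
--             product = arr[i] * arr[j]
--             if product > max_product:
--                 max_product = product
--     return max_product
-- ===== SOURCE B (Python) =====
-- def max_product_array(arr):
--     if len(arr) < 2:
--         return None
--     best = arr[0] * arr[1]
--     max_v = max(arr[0], arr[1])
--     min_v = min(arr[0], arr[1])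
--     for x in arr[2:]:
--         best = max(best, x * max_v, x * min_v)
--         max_v = max(max_v, x)
--         min_v = min(min_v, x)
--     return best
-- ===== Notes on version B (the rewrite author's own statement) =====
-- stated objective: faster
-- what changed: Replaced the O(n^2) scan over all pairs by a single pass that keeps the running maximum and minimum element: the best pair product ending at x is max(x*max_so_far, x*min_so_far).
import Mathlib
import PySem

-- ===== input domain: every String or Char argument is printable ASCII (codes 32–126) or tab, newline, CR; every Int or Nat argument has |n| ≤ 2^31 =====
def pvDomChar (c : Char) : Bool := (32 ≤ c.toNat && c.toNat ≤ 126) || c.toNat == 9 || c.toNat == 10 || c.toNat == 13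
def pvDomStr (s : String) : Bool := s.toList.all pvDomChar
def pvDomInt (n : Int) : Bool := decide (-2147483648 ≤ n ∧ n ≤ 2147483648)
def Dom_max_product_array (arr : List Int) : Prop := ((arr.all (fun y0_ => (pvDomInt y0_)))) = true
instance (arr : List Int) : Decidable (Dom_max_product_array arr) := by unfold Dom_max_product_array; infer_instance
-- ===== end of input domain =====

-- B replaces A's O(n^2) all-pairs scan by one O(n) pass over the list keeping the running
-- maximum and minimum element (the best pair product involving x as the later element is
-- max(x*max_so_far, x*min_so_far)); same return value, asymptotically faster.

-- ===== PORT A =====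
def max_product_array (arr : List Int) : Option Int :=
  if arr.length < 2 then none
  else
    some ((PySem.List.pyRange 0 arr.length 1).foldl (fun acc i =>
      (PySem.List.pyRange (i + 1) arr.length 1).foldl (fun acc2 j =>
        let p := PySem.List.pyGetD arr i 0 * PySem.List.pyGetD arr j 0
        if p > acc2 then p else acc2) acc)
      (PySem.List.pyGetD arr 0 0 * PySem.List.pyGetD arr 1 0))

-- ===== PORT B =====
def max_product_array_alt (arr : List Int) : Option Int :=
  match arr with
  | x :: y :: rest =>
    some (rest.foldl (fun (s : Int × Int × Int) z =>
        (max s.1 (max (z * s.2.1) (z * s.2.2)), max s.2.1 z, min s.2.2 z))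
        (x * y, max x y, min x y)).1
  | _ => none

-- ===== PRECONDITION & SPEC =====
def Spec_max_product_array (arr : List Int) (out : Option Int) : Prop := out = max_product_array_alt arr
instance (arr : List Int) (out : Option Int) : Decidable (Spec_max_product_array arr out) := by unfold Spec_max_product_array; infer_instance

-- ===== CLAIM (what is proved, stated in full; the proofs are below) =====
def Claim_equal_max_product_array : Prop := ∀ (arr : List Int), Dom_max_product_array arr → Spec_max_product_array arr (max_product_array arr)

-- ===== LEMMAS AND PROOFS =====

-- products a*b over all pairs (a earlier, b later), in A's scan order
def pairProds : List Int → List Int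
  | [] => []
  | a :: t => t.map (fun b => a * b) ++ pairProds t

-- products z*a of each element z with every element a before it, starting after `seen`
def pairsWith : List Int → List Int → List Int
  | _, [] => []
  | seen, z :: t => seen.map (fun a => z * a) ++ pairsWith (seen ++ [z]) t

lemma foldl_max_le (l : List Int) (b K : Int) (hb : b ≤ K) (h : ∀ y ∈ l, y ≤ K) :
    l.foldl max b ≤ K := by
  induction l generalizing b with
  | nil => simpa using hb
  | cons a t ih =>
    simp only [List.foldl_cons]
    exact ih _ (max_le hb (h a (by simp))) (fun y hy => h y (by simp [hy]))

lemma foldl_max_eq (l : List Int) (b K : Int) (hK : K ∈ l) (h : ∀ y ∈ l, y ≤ K) :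
    l.foldl max b = max b K := by
  refine le_antisymm ?_ ?_
  · exact foldl_max_le l b (max b K) (le_max_left _ _)
      (fun y hy => le_trans (h y hy) (le_max_right _ _))
  · exact max_le (PySem.List.le_foldl_max l b).1 ((PySem.List.le_foldl_max l b).2 K hK)

lemma foldl_max_map_mul (p : List Int) (z mx mn b : Int)
    (hmx : mx ∈ p) (hmn : mn ∈ p) (hup : ∀ a ∈ p, a ≤ mx) (hlo : ∀ a ∈ p, mn ≤ a) :
    (p.map (fun a => z * a)).foldl max b = max b (max (z * mx) (z * mn)) := by
  apply foldl_max_eq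
  · rcases le_total (z * mx) (z * mn) with h | h
    · rw [max_eq_right h]; exact List.mem_map.2 ⟨mn, hmn, rfl⟩
    · rw [max_eq_left h]; exact List.mem_map.2 ⟨mx, hmx, rfl⟩
  · intro y hy
    obtain ⟨a, ha, rfl⟩ := List.mem_map.1 hy
    rcases le_total 0 z with hz | hz
    · exact le_max_of_le_left (mul_le_mul_of_nonneg_left (hup a ha) hz)
    · exact le_max_of_le_right (mul_le_mul_of_nonpos_left (hlo a ha) hz)

lemma pairProds_append_singleton (l : List Int) (z : Int) :
    (pairProds (l ++ [z])).Perm (pairProds l ++ l.map (fun a => z * a)) := by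
  induction l with
  | nil => simp [pairProds]
  | cons a t ih =>
    have e1 : pairProds (a :: t ++ [z]) = t.map (fun b => a * b) ++ (a * z :: pairProds (t ++ [z])) := by
      simp [pairProds, List.append_assoc]
    have e2 : pairProds (a :: t) ++ (a :: t).map (fun b => z * b)
        = t.map (fun b => a * b) ++ (pairProds t ++ (z * a :: t.map (fun b => z * b))) := by
      simp [pairProds, List.append_assoc]
    rw [e1, e2, mul_comm a z]
    refine List.Perm.append_left _ ?_
    exact (List.Perm.cons _ ih).trans List.perm_middle.symm

lemma pairProds_split : ∀ (rest seen : List Int),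
    (pairProds (seen ++ rest)).Perm (pairProds seen ++ pairsWith seen rest) := by
  intro rest
  induction rest with
  | nil => intro seen; simp [pairsWith]
  | cons z t ih =>
    intro seen
    have h1 : seen ++ z :: t = (seen ++ [z]) ++ t := by simp
    rw [h1]
    show _root_.List.Perm _ (pairProds seen ++ (seen.map (fun a => z * a) ++ pairsWith (seen ++ [z]) t))
    refine (ih (seen ++ [z])).trans ?_
    rw [← List.append_assoc]
    exact (pairProds_append_singleton seen z).append_right _

lemma loop_spec : ∀ (rest seen : List Int) (b mx mn : Int),
    mx ∈ seen → mn ∈ seen → (∀ a ∈ seen, a ≤ mx) → (∀ a ∈ seen, mn ≤ a) →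
    (rest.foldl (fun (s : Int × Int × Int) z =>
        (max s.1 (max (z * s.2.1) (z * s.2.2)), max s.2.1 z, min s.2.2 z)) (b, mx, mn)).1
      = (pairsWith seen rest).foldl max b := by
  intro rest
  induction rest with
  | nil => intro seen b mx mn _ _ _ _; simp [pairsWith]
  | cons z t ih =>
    intro seen b mx mn hmx hmn hup hlo
    simp only [List.foldl_cons, pairsWith, List.foldl_append]
    rw [ih (seen ++ [z]) _ (max mx z) (min mn z)
      (by rcases le_total z mx with h | h
          · rw [max_eq_left h]; exact List.mem_append_left _ hmx
          · rw [max_eq_right h]; exact List.mem_append_right _ (by simp))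
      (by rcases le_total mn z with h | h
          · rw [min_eq_left h]; exact List.mem_append_left _ hmn
          · rw [min_eq_right h]; exact List.mem_append_right _ (by simp))
      (by intro a ha
          rcases List.mem_append.1 ha with h | h
          · exact le_trans (hup a h) (le_max_left _ _)
          · simp at h; subst h; exact le_max_right _ _)
      (by intro a ha
          rcases List.mem_append.1 ha with h | h
          · exact le_trans (min_le_left _ _) (hlo a h)
          · simp at h; subst h; exact min_le_right _ _)]
    rw [foldl_max_map_mul seen z mx mn b hmx hmn hup hlo]

-- A side: map of pyGetD over pyRange is drop
lemma map_getD_pyRange (arr : List Int) :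
    ∀ k s : Nat, arr.length - s ≤ k →
      (PySem.List.pyRange (s : Int) arr.length 1).map (fun j => PySem.List.pyGetD arr j 0)
        = arr.drop s := by
  intro k
  induction k with
  | zero =>
    intro s hs
    have hlen : (arr.length : Int) ≤ (s : Int) := by exact_mod_cast Nat.le_of_sub_eq_zero (Nat.le_zero.1 hs)
    rw [PySem.List.pyRange_one_eq_nil hlen, List.drop_eq_nil_of_le (by omega)]
    rfl
  | succ k ih =>
    intro s hs
    by_cases h : s < arr.length
    · rw [PySem.List.pyRange_one_cons (by exact_mod_cast h), List.map_cons]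
      have : (s : Int) + 1 = ((s + 1 : Nat) : Int) := by push_cast; ring
      rw [this, ih (s + 1) (by omega), List.drop_eq_getElem_cons h]
      congr 1
      rw [PySem.List.pyGetD_eq_getElem] <;> simp [h]
    · have hlen : (arr.length : Int) ≤ (s : Int) := by exact_mod_cast Nat.le_of_not_lt h
      rw [PySem.List.pyRange_one_eq_nil hlen, List.drop_eq_nil_of_le (by omega)]
      rfl

lemma outer_flat (arr : List Int) :
    ∀ k s : Nat, arr.length - s ≤ k →
      (PySem.List.pyRange (s : Int) arr.length 1).flatMap
        (fun i => (PySem.List.pyRange (i + 1) arr.length 1).map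
          (fun j => PySem.List.pyGetD arr i 0 * PySem.List.pyGetD arr j 0))
      = pairProds (arr.drop s) := by
  intro k
  induction k with
  | zero =>
    intro s hs
    have hlen : (arr.length : Int) ≤ (s : Int) := by exact_mod_cast Nat.le_of_sub_eq_zero (Nat.le_zero.1 hs)
    rw [PySem.List.pyRange_one_eq_nil hlen, List.drop_eq_nil_of_le (by omega)]
    rfl
  | succ k ih =>
    intro s hs
    by_cases h : s < arr.length
    · rw [PySem.List.pyRange_one_cons (by exact_mod_cast h), List.flatMap_cons]
      have hc : (s : Int) + 1 = ((s + 1 : Nat) : Int) := by push_cast; ring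
      have hin : (PySem.List.pyRange ((s : Int) + 1) arr.length 1).map
            (fun j => PySem.List.pyGetD arr (s : Int) 0 * PySem.List.pyGetD arr j 0)
          = (arr.drop (s + 1)).map (fun b => arr[s] * b) := by
        rw [show (fun j => PySem.List.pyGetD arr (s : Int) 0 * PySem.List.pyGetD arr j 0)
              = (fun b => PySem.List.pyGetD arr (s : Int) 0 * b) ∘ (fun j => PySem.List.pyGetD arr j 0) from rfl]
        rw [← List.map_map, hc, map_getD_pyRange arr (k + 1) (s + 1) (by omega)]
        congr 1
        funext b
        congr 1
        rw [PySem.List.pyGetD_eq_getElem] <;> simp [h]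
      rw [hin, hc, ih (s + 1) (by omega), List.drop_eq_getElem_cons h]
      rfl
    · have hlen : (arr.length : Int) ≤ (s : Int) := by exact_mod_cast Nat.le_of_not_lt h
      rw [PySem.List.pyRange_one_eq_nil hlen, List.drop_eq_nil_of_le (by omega)]
      rfl

lemma if_gt_eq_max (a p : Int) : (if p > a then p else a) = max a p := by
  by_cases h : a < p
  · rw [if_pos h, max_eq_right h.le]
  · rw [if_neg h, max_eq_left (not_lt.mp h)]

lemma foldl_foldl_max (l : List Int) (h : Int → List Int) (b : Int) :
    l.foldl (fun acc i => (h i).foldl max acc) b = (l.flatMap h).foldl max b := by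
  induction l generalizing b with
  | nil => rfl
  | cons a t ih => simp only [List.foldl_cons, List.flatMap_cons, List.foldl_append, ih]

-- A's nested index loops compute the fold of max over pairProds
lemma portA_eq (x y : Int) (rest : List Int) :
    max_product_array (x :: y :: rest)
      = some ((pairProds (x :: y :: rest)).foldl max (x * y)) := by
  have hlen : ¬ (x :: y :: rest).length < 2 := by simp
  rw [max_product_array, if_neg hlen]
  have h0 : PySem.List.pyGetD (x :: y :: rest) 0 0 = x := PySem.List.pyGetD_zero_cons x (y :: rest) 0
  have h1 : PySem.List.pyGetD (x :: y :: rest) 1 0 = y := by simp [pysem]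
  rw [h0, h1]
  congr 1
  have hinner : ∀ (acc : Int) (i : Int),
      (PySem.List.pyRange (i + 1) (x :: y :: rest).length 1).foldl (fun acc2 j =>
        let p := PySem.List.pyGetD (x :: y :: rest) i 0 * PySem.List.pyGetD (x :: y :: rest) j 0
        if p > acc2 then p else acc2) acc
      = ((PySem.List.pyRange (i + 1) (x :: y :: rest).length 1).map
          (fun j => PySem.List.pyGetD (x :: y :: rest) i 0 * PySem.List.pyGetD (x :: y :: rest) j 0)).foldl max acc := by
    intro acc i
    rw [List.foldl_map]
    apply PySem.List.foldl_congr_mem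
    intro b j _; exact if_gt_eq_max b _
  calc (PySem.List.pyRange 0 (x :: y :: rest).length 1).foldl (fun acc i =>
          (PySem.List.pyRange (i + 1) (x :: y :: rest).length 1).foldl (fun acc2 j =>
            let p := PySem.List.pyGetD (x :: y :: rest) i 0 * PySem.List.pyGetD (x :: y :: rest) j 0
            if p > acc2 then p else acc2) acc) (x * y)
      = (PySem.List.pyRange 0 (x :: y :: rest).length 1).foldl (fun acc i =>
          ((PySem.List.pyRange (i + 1) (x :: y :: rest).length 1).map
            (fun j => PySem.List.pyGetD (x :: y :: rest) i 0 * PySem.List.pyGetD (x :: y :: rest) j 0)).foldl max acc) (x * y) := by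
            apply PySem.List.foldl_congr_mem
            intro b i _; exact hinner b i
    _ = ((PySem.List.pyRange 0 (x :: y :: rest).length 1).flatMap
          (fun i => (PySem.List.pyRange (i + 1) (x :: y :: rest).length 1).map
            (fun j => PySem.List.pyGetD (x :: y :: rest) i 0 * PySem.List.pyGetD (x :: y :: rest) j 0))).foldl max (x * y) :=
          foldl_foldl_max _ _ _
    _ = (pairProds ((x :: y :: rest).drop 0)).foldl max (x * y) := by
          have h := outer_flat (x :: y :: rest) (x :: y :: rest).length 0 (by omega)
          simp only [Nat.cast_zero] at h
          rw [h]
    _ = (pairProds (x :: y :: rest)).foldl max (x * y) := rfl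

-- ===== VERDICT (by name: the statement is the Claim_ definition above) =====
theorem max_product_array_spec : Claim_equal_max_product_array := by
  intro arr _
  unfold Spec_max_product_array
  match arr with
  | [] => rfl
  | [x] => rfl
  | x :: y :: rest =>
    rw [portA_eq]
    simp only [max_product_array_alt]
    rw [loop_spec rest [x, y] (x * y) (max x y) (min x y)
      (by rcases le_total x y with h | h
          · rw [max_eq_right h]; simp
          · rw [max_eq_left h]; simp)
      (by rcases le_total x y with h | h
          · rw [min_eq_left h]; simp
          · rw [min_eq_right h]; simp)
      (by intro a ha; simp at ha; rcases ha with rfl | rfl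
          · exact le_max_left _ _
          · exact le_max_right _ _)
      (by intro a ha; simp at ha; rcases ha with rfl | rfl
          · exact min_le_left _ _
          · exact min_le_right _ _)]
    have hsplit : (pairProds ([x, y] ++ rest)).foldl max (x * y)
        = (pairProds [x, y] ++ pairsWith [x, y] rest).foldl max (x * y) :=
      (pairProds_split rest [x, y]).foldl_eq (x * y)
    have : pairProds ([x, y] : List Int) = [x * y] := by simp [pairProds]
    rw [show x :: y :: rest = [x, y] ++ rest from rfl, hsplit, this]
    simp [List.foldl_cons]
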